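-- pv_equiv track=rewrite | github.com/IngerMasha/Solve-The-Matrix | Matrix.py | sicret
-- ===== SOURCE A (Python) =====
-- def sicret(matrix):
--     result = ''
--     for i in range(0,3):
--         for j in range(0,len(matrix)):
--             simbol = matrix[j][i]
--             if simbol.isalpha():
--                 result+=simbol
--             else:
--                 result += ' '
--     result=result.split()
--     result=' '.join(result)
--     return result
-- ===== SOURCE B (Python) =====
-- def sicret(matrix):
--     stream = [row[i] for i in range(3) for row in matrix]
--     kept = [(k, c) for k, c in enumerate(stream) if c.isalpha()]
--     if not kept:
--         return ''
--     out = [kept[0][1]]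
--     prev = kept[0][0]
--     for k, c in kept[1:]:
--         if k - prev > 1:
--             out.append(' ')
--         out.append(c)
--         prev = k
--     return ''.join(out)
-- ===== Notes on version B (the rewrite author's own statement) =====
-- stated objective: alternative
-- what changed: B materializes the column-major character stream, collects the (index, char) pairs of the alphabetic characters with enumerate+filter, and emits a space exactly where two consecutive kept indices differ by more than 1, instead of A's mask-non-alpha-to-space string followed by split()/join normalization.
import Mathlib
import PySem

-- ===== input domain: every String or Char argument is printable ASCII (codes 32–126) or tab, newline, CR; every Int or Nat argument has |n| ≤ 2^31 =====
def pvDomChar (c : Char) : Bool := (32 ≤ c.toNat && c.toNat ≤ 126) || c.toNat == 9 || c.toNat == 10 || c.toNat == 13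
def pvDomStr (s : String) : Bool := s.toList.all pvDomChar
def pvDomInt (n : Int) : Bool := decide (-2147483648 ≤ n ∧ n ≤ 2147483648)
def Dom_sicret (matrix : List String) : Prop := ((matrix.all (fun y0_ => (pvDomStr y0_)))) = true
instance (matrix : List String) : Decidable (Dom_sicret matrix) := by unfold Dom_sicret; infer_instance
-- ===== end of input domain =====

-- B finds the alphabetic characters with their stream indices and inserts a space exactly at
-- index gaps > 1, instead of A's mask-to-space string followed by split()/join; equivalence on
-- rows of length ≥ 3 (on shorter rows both raise IndexError).

-- ===== PORT A =====
def saStep (i : Int) (result : List Char) (row : String) : List Char :=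
  match PySem.Str.pyGet? row i with
  | none => result
  | some simbol =>
      if PySem.Chars.isalpha simbol then result ++ [simbol] else result ++ [' ']

def sicret (matrix : List String) : String :=
  let result : List Char :=
    (PySem.List.pyRange 0 3).foldl (fun result i =>
      (PySem.List.pyRange 0 (PySem.List.len matrix)).foldl
        (fun result j => saStep i result (PySem.List.pyGetD matrix j "")) result) []
  String.mk (PySem.Chars.join [' '] (PySem.Chars.split₀ result))

-- ===== PORT B =====
-- stream = [row[i] for i in range(3) for row in matrix]; the .getD ' ' default is unreachable under Pre_
def sicret_alt (matrix : List String) : String :=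
  let stream : List Char :=
    (PySem.List.pyRange 0 3).flatMap (fun i =>
      matrix.map (fun row => (PySem.Str.pyGet? row i).getD ' '))
  let kept : List (Int × Char) :=
    (PySem.List.enumerate stream).filter (fun p => PySem.Chars.isalpha p.2)
  match kept with
  | [] => ""
  | q0 :: rest =>
      String.mk
        ((rest.foldl
            (fun st q => ((if q.1 - st.2 > 1 then st.1 ++ [' '] else st.1) ++ [q.2], q.1))
            ([q0.2], q0.1)).1)

-- ===== PRECONDITION & SPEC =====
-- Pre_ excludes matrices containing a row shorter than 3 characters: there A raises IndexError (and so does B).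
def Pre_sicret (matrix : List String) : Prop := ∀ s ∈ matrix, 3 ≤ s.toList.length
instance (matrix : List String) : Decidable (Pre_sicret matrix) := by unfold Pre_sicret; infer_instance
def pvWitness_sicret : List String := ["abc", "x z", "12y"]

def Spec_sicret (matrix : List String) (out : String) : Prop := out = sicret_alt matrix
instance (matrix : List String) (out : String) : Decidable (Spec_sicret matrix out) := by unfold Spec_sicret; infer_instance

-- ===== CLAIM (what is proved, stated in full; the proofs are below) =====
def Claim_equal_sicret : Prop := ∀ (matrix : List String), Dom_sicret matrix → Pre_sicret matrix → Spec_sicret matrix (sicret matrix)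

-- ===== LEMMAS AND PROOFS =====

-- mask: what A stores for each streamed character
def pvMask (c : Char) : Char := if PySem.Chars.isalpha c then c else ' '

-- the character of a row at nat index i (total version; equals the real char when i < length)
def pvGetI (i : Nat) (row : String) : Char := row.toList.getD i ' '

-- A's word accumulator (proof-side characterization of split₀ on the masked stream)
def pvStepB (st : List (List Char) × List Char) (c : Char) : List (List Char) × List Char :=
  if PySem.Chars.isalpha c then (st.1, st.2 ++ [c])
  else if st.2.isEmpty then st else (st.1 ++ [st.2], [])

def pvFinish (st : List (List Char) × List Char) : List (List Char) :=
  if st.2.isEmpty then st.1 else st.1 ++ [st.2]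

-- canonical output of the whole task: e = "some output already emitted", a = "previous char was alpha"
def canon (e a : Bool) : List Char → List Char
  | [] => []
  | c :: s =>
      if PySem.Chars.isalpha c then (if e && !a then [' '] else []) ++ c :: canon true true s
      else canon e false s

-- B's kept (index, char) pairs, recursively
def pvKept (n : Int) : List Char → List (Int × Char)
  | [] => []
  | c :: s => if PySem.Chars.isalpha c then (n, c) :: pvKept (n + 1) s else pvKept (n + 1) s

-- B's emission after the first kept char, recursively (p = index of the previous kept char)
def pvG (p : Int) : List (Int × Char) → List Char
  | [] => []
  | q :: t => (if q.1 - p > 1 then [' '] else []) ++ q.2 :: pvG q.1 t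

theorem isspace_of_isalpha (c : Char) (h : PySem.Chars.isalpha c = true) :
    PySem.Chars.isspace c = false := by
  simp only [PySem.Chars.isalpha, PySem.Chars.isupper, PySem.Chars.islower, Bool.or_eq_true,
    Bool.and_eq_true, decide_eq_true_eq, Char.le_def, UInt32.le_iff_toNat_le, Char.toNat_val,
    show 'A'.toNat = 65 from rfl, show 'Z'.toNat = 90 from rfl,
    show 'a'.toNat = 97 from rfl, show 'z'.toNat = 122 from rfl] at h
  rcases h with ⟨h1, h2⟩ | ⟨h1, h2⟩ <;> · simp [PySem.Chars.isspace] ; omega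

theorem isspace_mask (c : Char) : PySem.Chars.isspace (pvMask c) = !PySem.Chars.isalpha c := by
  unfold pvMask
  by_cases h : PySem.Chars.isalpha c = true
  · rw [if_pos h, isspace_of_isalpha c h, h] ; rfl
  · rw [if_neg h, eq_false_of_ne_true h] ; decide

theorem go_spec (cs : List Char) (words : List (List Char)) (cur : List Char) :
    PySem.Chars.split₀.go (cs.map pvMask) cur.reverse words.reverse =
      pvFinish (cs.foldl pvStepB (words, cur)) := by
  induction cs generalizing words cur with
  | nil =>
      simp only [List.map_nil, PySem.Chars.split₀.go, pvFinish, List.foldl_nil,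
        List.isEmpty_reverse]
      by_cases h : cur.isEmpty <;> simp [h]
  | cons c cs ih =>
      simp only [List.map_cons, PySem.Chars.split₀.go, isspace_mask]
      by_cases ha : PySem.Chars.isalpha c = true
      · have hm : pvMask c = c := by simp [pvMask, ha]
        simp only [ha, Bool.not_true, if_neg (by simp : ¬ (false = true)), hm]
        have : (c :: cur.reverse) = (cur ++ [c]).reverse := by simp
        rw [this, ih words (cur ++ [c])]
        simp [pvStepB, ha]
      · simp only [ha, Bool.not_false, List.isEmpty_reverse]
        by_cases hc : cur.isEmpty
        · have : cur = [] := List.isEmpty_iff.mp hc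
          subst this
          simp only [hc, List.reverse_nil]
          have := ih words []
          simp only [List.reverse_nil] at this
          rw [this]
          simp [pvStepB, ha, hc]
        · simp only [hc, if_neg hc]
          have h1 : (cur.reverse.reverse :: words.reverse) = (words ++ [cur]).reverse := by simp
          have h2 : ([] : List Char) = ([] : List Char).reverse := rfl
          rw [h1, h2, ih (words ++ [cur]) []]
          simp [pvStepB, ha, hc]

theorem innerA (rows : List String) (i : Nat) (h : ∀ r ∈ rows, i < r.toList.length)
    (acc : List Char) :
    rows.foldl (saStep (i : Int)) acc
      = acc ++ (rows.map (fun row => pvMask (pvGetI i row))) := by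
  induction rows generalizing acc with
  | nil => simp
  | cons r rs ih =>
      have hr : r.toList[i]? = some (pvGetI i r) := by
        have := h r (by simp)
        simp [pvGetI, List.getD_eq_getElem?_getD, List.getElem?_eq_getElem this]
      simp only [List.foldl_cons, List.map_cons, saStep, PySem.Str.pyGet?_natCast, hr]
      rw [ih (fun r hm => h r (by simp [hm]))]
      by_cases ha : PySem.Chars.isalpha (pvGetI i r) = true <;> simp [ha, pvMask]

theorem streamB (rows : List String) (i : Nat) (h : ∀ r ∈ rows, i < r.toList.length) :
    rows.map (fun row => (PySem.Str.pyGet? row (i : Int)).getD ' ') = rows.map (pvGetI i) := by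
  apply List.map_congr_left
  intro r hr
  have hg : r.toList[i]? = some (pvGetI i r) := by
    have := h r hr
    simp [pvGetI, List.getD_eq_getElem?_getD, List.getElem?_eq_getElem this]
  simp [PySem.Str.pyGet?_natCast, hg]

theorem join_append (ws : List (List Char)) (w : List Char) :
    PySem.Chars.join [' '] (ws ++ [w]) =
      PySem.Chars.join [' '] ws ++ (if ws.isEmpty then [] else [' ']) ++ w := by
  induction ws with
  | nil => simp [PySem.Chars.join_singleton, PySem.Chars.join_nil]
  | cons v vs ih =>
      cases vs with
      | nil => simp [PySem.Chars.join_cons_cons, PySem.Chars.join_singleton]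
      | cons v' vs' =>
          simp only [List.cons_append, PySem.Chars.join_cons_cons, List.isEmpty_cons] at *
          simp [ih, List.append_assoc]

-- A's accumulator result, joined, continues with canon
theorem pvFinish_nilcur (words : List (List Char)) : pvFinish (words, []) = words := by
  simp [pvFinish]

theorem pvFinish_cons (words : List (List Char)) (d : Char) (cur : List Char) :
    pvFinish (words, d :: cur) = words ++ [d :: cur] := by
  simp [pvFinish]

theorem L1 (s : List Char) (words : List (List Char)) (cur : List Char) :
    PySem.Chars.join [' '] (pvFinish (s.foldl pvStepB (words, cur))) =
      PySem.Chars.join [' '] (pvFinish (words, cur)) ++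
        canon (!words.isEmpty || !cur.isEmpty) (!cur.isEmpty) s := by
  induction s generalizing words cur with
  | nil => simp [canon]
  | cons c s ih =>
      by_cases ha : PySem.Chars.isalpha c = true
      · have hstep : pvStepB (words, cur) c = (words, cur ++ [c]) := by simp [pvStepB, ha]
        simp only [List.foldl_cons, hstep, ih]
        cases cur with
        | nil =>
            rw [pvFinish_nilcur, show ([] : List Char) ++ [c] = [c] from rfl, pvFinish_cons,
              join_append]
            simp only [canon, ha, if_pos rfl, List.isEmpty_nil, Bool.not_true, Bool.or_false,
              List.isEmpty_cons, Bool.not_false, Bool.or_true, Bool.and_true]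
            cases hw : words.isEmpty <;> simp [List.append_assoc]
        | cons d cur' =>
            rw [pvFinish_cons, show (d :: cur') ++ [c] = d :: (cur' ++ [c]) from rfl,
              pvFinish_cons, join_append, join_append]
            simp only [canon, ha, if_pos rfl, List.isEmpty_cons, Bool.not_false, Bool.or_true,
              Bool.and_false]
            simp [List.append_assoc]
      · have ha' : PySem.Chars.isalpha c = false := eq_false_of_ne_true ha
        cases cur with
        | nil =>
            have hstep : pvStepB (words, ([] : List Char)) c = (words, []) := by
              simp [pvStepB, ha']
            simp only [List.foldl_cons, hstep, ih, canon, ha']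
            simp
        | cons d cur' =>
            have hstep : pvStepB (words, d :: cur') c = (words ++ [d :: cur'], []) := by
              simp [pvStepB, ha']
            simp only [List.foldl_cons, hstep, ih, canon, ha']
            rw [pvFinish_nilcur, pvFinish_cons]
            have hne : (words ++ [d :: cur']).isEmpty = false := by simp
            simp [hne]

-- kept pairs via enumerate+filter equal the recursive pvKept
theorem enumerate_filter (s : List Char) (n : Int) :
    (PySem.List.enumerate s n).filter (fun p => PySem.Chars.isalpha p.2) = pvKept n s := by
  induction s generalizing n with
  | nil => simp [PySem.List.enumerate_nil, pvKept]
  | cons c s ih =>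
      rw [PySem.List.enumerate_cons]
      by_cases ha : PySem.Chars.isalpha c = true <;>
        simp [pvKept, ha, ih]

-- B's foldl emission equals the recursive pvG
theorem foldG (l : List (Int × Char)) (a : List Char) (p : Int) :
    (l.foldl (fun st q => ((if q.1 - st.2 > 1 then st.1 ++ [' '] else st.1) ++ [q.2], q.1))
        (a, p)).1 = a ++ pvG p l := by
  induction l generalizing a p with
  | nil => simp [pvG]
  | cons q t ih =>
      simp only [List.foldl_cons, ih, pvG]
      by_cases h : q.1 - p > 1 <;> simp [h, List.append_assoc]

theorem keptCanon (s : List Char) (p n : Int) (h : p < n) :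
    pvG p (pvKept n s) = canon true (decide (n = p + 1)) s := by
  induction s generalizing p n with
  | nil => simp [pvKept, pvG, canon]
  | cons c s ih =>
      have hih := ih n (n + 1) (by omega)
      have hde : decide ((n : Int) + 1 = n + 1) = true := by simp
      rw [hde] at hih
      by_cases ha : PySem.Chars.isalpha c = true
      · by_cases he : n = p + 1
        · have h2 : ¬ (n - p > 1) := by omega
          have hd : decide (n = p + 1) = true := by simp [he]
          simp [pvKept, canon, pvG, ha, h2, hd, hih]
        · have h2 : n - p > 1 := by omega
          have hd : decide (n = p + 1) = false := by simp [he]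
          simp [pvKept, canon, pvG, ha, h2, hd, hih]
      · have hih2 := ih p (n + 1) (by omega)
        have hd : decide ((n : Int) + 1 = p + 1) = false := by
          simp only [decide_eq_false_iff_not] ; omega
        rw [hd] at hih2
        simp [pvKept, canon, pvG, ha, hih2]

theorem headCanon (s : List Char) (n : Int) :
    (match pvKept n s with
     | [] => ([] : List Char)
     | q :: t => q.2 :: pvG q.1 t) = canon false false s := by
  induction s generalizing n with
  | nil => simp [pvKept, canon]
  | cons c s ih =>
      by_cases ha : PySem.Chars.isalpha c = true
      · simp [pvKept, canon, ha, keptCanon s n (n + 1) (by omega)]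
      · simpa [pvKept, canon, ha] using ih (n + 1)

theorem maskmap (l : List String) (i : Nat) :
    l.map (fun row => pvMask (pvGetI i row)) = (l.map (pvGetI i)).map pvMask := by
  simp

-- A side, on an arbitrary character stream
theorem Aside (s : List Char) :
    String.mk (PySem.Chars.join [' '] (PySem.Chars.split₀ (s.map pvMask))) =
      String.mk (canon false false s) := by
  have hgo := go_spec s [] []
  simp only [List.reverse_nil] at hgo
  show String.mk (PySem.Chars.join [' ']
    (PySem.Chars.split₀.go (s.map pvMask) [] [])) = _
  rw [hgo, L1]
  simp [pvFinish, PySem.Chars.join_nil]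

-- B side, on an arbitrary character stream
theorem Bside (s : List Char) :
    (match (PySem.List.enumerate s).filter (fun p => PySem.Chars.isalpha p.2) with
     | [] => ""
     | q0 :: rest =>
         String.mk
           ((rest.foldl
               (fun st q => ((if q.1 - st.2 > 1 then st.1 ++ [' '] else st.1) ++ [q.2], q.1))
               ([q0.2], q0.1)).1))
      = String.mk (canon false false s) := by
  rw [enumerate_filter s 0]
  have hhead := headCanon s 0
  cases hk : pvKept 0 s with
  | nil =>
      rw [hk] at hhead
      simp only at hhead
      rw [← hhead]
      rfl
  | cons q t =>
      rw [hk] at hhead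
      simp only at hhead
      show String.mk
          ((t.foldl
              (fun st q => ((if q.1 - st.2 > 1 then st.1 ++ [' '] else st.1) ++ [q.2], q.1))
              ([q.2], q.1)).1) = _
      rw [foldG, ← hhead]
      rfl

-- ===== VERDICT (by name: the statement is the Claim_ definition above) =====
theorem sicret_spec : Claim_equal_sicret := by
  intro matrix _ hPre
  show sicret matrix = sicret_alt matrix
  have hlen : ∀ (i : Nat), i < 3 → ∀ r ∈ matrix, i < r.toList.length := by
    intro i hi r hr
    have := hPre r hr
    omega
  have hrange : PySem.List.pyRange 0 3 = [0, 1, 2] := by decide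
  unfold sicret sicret_alt
  rw [hrange]
  simp only [List.foldl_cons, List.foldl_nil, List.flatMap_cons, List.flatMap_nil,
    List.append_nil]
  rw [PySem.List.foldl_pyRange_pyGetD matrix "" _ _ (by norm_num),
      PySem.List.foldl_pyRange_pyGetD matrix "" _ _ (by norm_num),
      PySem.List.foldl_pyRange_pyGetD matrix "" _ _ (by norm_num)]
  simp only [Int.toNat_zero, List.drop_zero]
  have hA0 := innerA matrix 0 (hlen 0 (by norm_num))
  have hA1 := innerA matrix 1 (hlen 1 (by norm_num))
  have hA2 := innerA matrix 2 (hlen 2 (by norm_num))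
  have hB0 := streamB matrix 0 (hlen 0 (by norm_num))
  have hB1 := streamB matrix 1 (hlen 1 (by norm_num))
  have hB2 := streamB matrix 2 (hlen 2 (by norm_num))
  simp only [Nat.cast_zero, Nat.cast_one, Nat.cast_ofNat] at hA0 hA1 hA2 hB0 hB1 hB2
  rw [hA0, hA1, hA2, hB0, hB1, hB2, maskmap matrix 0, maskmap matrix 1, maskmap matrix 2]
  simp only [List.nil_append, List.append_nil, List.append_assoc, ← List.map_append]
  rw [Aside, Bside]
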